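-- pv_equiv track=rewrite | github.com/dramuletz/info_meteo_romania | custom_components/info_meteo_romania/sensor.py | _parse_alert_color
-- ===== SOURCE A (Python) =====
-- def _parse_alert_color(data):
--     """Culoarea celei mai severe alerte."""
--     alerts = data.get("alerts", [])
--     if not alerts:
--         return "Verde"
--     color_priority = {"red": 4, "orange": 3, "yellow": 2, "green": 1}
--     color_names = {"red": "Roșu", "orange": "Portocaliu", "yellow": "Galben", "green": "Verde"}
--     max_color = "green"
--     max_priority = 0
--     for alert in alerts:
--         if isinstance(alert, dict):
--             color = alert.get("color", "green").lower()
--             if color_priority.get(color, 0) > max_priority: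
--                 max_priority = color_priority[color]
--                 max_color = color
--     return color_names.get(max_color, "Verde")
-- ===== SOURCE B (Python) =====
-- def _parse_alert_color(data):
--     """Culoarea celei mai severe alerte."""
--     present = {a.get("color", "green").lower()
--                for a in data.get("alerts", []) if isinstance(a, dict)}
--     for color, name in (("red", "Ro\u0219u"), ("orange", "Portocaliu"), ("yellow", "Galben")):
--         if color in present:
--             return name
--     return "Verde"
-- ===== Notes on version B (the rewrite author's own statement) =====
-- stated objective: simpler
-- what changed: Replaces A's single pass tracking a running (max_color, max_priority) accumulator by collecting the set of lowercased colors and then probing the fixed severity order red/orange/yellow, returning the first name found (else 'Verde').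
import Mathlib
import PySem

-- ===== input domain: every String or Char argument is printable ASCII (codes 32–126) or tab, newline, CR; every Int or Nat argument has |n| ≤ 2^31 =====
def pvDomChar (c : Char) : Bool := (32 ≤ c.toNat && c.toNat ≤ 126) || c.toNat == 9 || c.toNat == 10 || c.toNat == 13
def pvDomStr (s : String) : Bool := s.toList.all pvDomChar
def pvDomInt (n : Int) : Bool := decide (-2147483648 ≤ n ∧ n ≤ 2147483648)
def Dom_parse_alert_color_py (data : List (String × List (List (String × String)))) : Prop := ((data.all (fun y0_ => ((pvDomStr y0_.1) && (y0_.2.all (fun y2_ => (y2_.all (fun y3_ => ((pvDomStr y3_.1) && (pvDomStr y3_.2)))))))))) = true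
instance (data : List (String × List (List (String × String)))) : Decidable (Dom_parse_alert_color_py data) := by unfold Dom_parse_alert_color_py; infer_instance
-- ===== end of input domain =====

-- B replaces A's running (max_color, max_priority) accumulator by gathering the set of
-- lowercased colors and probing the fixed severity order red/orange/yellow (objective: simpler).

-- dict.get(k, dflt) on an association list (first match), shared dict primitive of both ports
def pvGetStr (d : List (String × String)) (k dflt : String) : String :=
  match d.find? (fun kv => kv.1 == k) with
  | some kv => kv.2
  | none => dflt

def pvGetAlerts (data : List (String × List (List (String × String)))) :
    List (List (String × String)) :=
  match data.find? (fun kv => kv.1 == "alerts") with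
  | some kv => kv.2
  | none => []

-- ===== PORT A =====
def pvPrio (c : String) : Int :=
  if c = "red" then 4 else if c = "orange" then 3 else if c = "yellow" then 2
  else if c = "green" then 1 else 0

def pvName (c : String) : String :=
  if c = "red" then "Roșu" else if c = "orange" then "Portocaliu"
  else if c = "yellow" then "Galben" else if c = "green" then "Verde" else "Verde"

def pvStep (st : String × Int) (alert : List (String × String)) : String × Int :=
  let color := PySem.Str.lower (pvGetStr alert "color" "green")
  if pvPrio color > st.2 then (color, pvPrio color) else st

def parse_alert_color_py (data : List (String × List (List (String × String)))) : String :=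
  let alerts := pvGetAlerts data
  if alerts = [] then "Verde"
  else
    let st := alerts.foldl pvStep ("green", 0)
    pvName st.1

-- ===== PORT B =====
def pvProbe : List (String × String) → List String → String
  | [], _ => "Verde"
  | (c, n) :: rest, present => if c ∈ present then n else pvProbe rest present

def parse_alert_color_py_alt (data : List (String × List (List (String × String)))) : String :=
  let present : PySem.Set String :=
    PySem.Set.ofList ((pvGetAlerts data).map (fun a => PySem.Str.lower (pvGetStr a "color" "green")))
  pvProbe [("red", "Roșu"), ("orange", "Portocaliu"), ("yellow", "Galben")] present

-- ===== PRECONDITION & SPEC =====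
def Spec_parse_alert_color_py (data : List (String × List (List (String × String)))) (out : String) : Prop := out = parse_alert_color_py_alt data
instance (data : List (String × List (List (String × String)))) (out : String) : Decidable (Spec_parse_alert_color_py data out) := by unfold Spec_parse_alert_color_py; infer_instance

-- ===== CLAIM (what is proved, stated in full; the proofs are below) =====
def Claim_equal_parse_alert_color_py : Prop := ∀ (data : List (String × List (List (String × String)))), Dom_parse_alert_color_py data → Spec_parse_alert_color_py data (parse_alert_color_py data)

-- ===== LEMMAS AND PROOFS =====

-- the states A's accumulator can ever hold
def pvInv (st : String × Int) : Prop :=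
  st = ("green", 0) ∨ st = ("green", 1) ∨ st = ("yellow", 2) ∨ st = ("orange", 3) ∨ st = ("red", 4)

-- A's fold step, expressed on the already-lowered color
def pvStepC (st : String × Int) (c : String) : String × Int :=
  if pvPrio c > st.2 then (c, pvPrio c) else st

lemma foldl_pvStep_eq (alerts : List (List (String × String))) (st : String × Int) :
    alerts.foldl pvStep st =
      (alerts.map (fun a => PySem.Str.lower (pvGetStr a "color" "green"))).foldl pvStepC st := by
  induction alerts generalizing st with
  | nil => rfl
  | cons a rest ih => simp [List.foldl, pvStep, pvStepC, ih]

lemma fold_name (cs : List String) : ∀ st : String × Int, pvInv st →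
    pvName (cs.foldl pvStepC st).1 =
      if "red" ∈ cs ∨ st.1 = "red" then "Roșu"
      else if "orange" ∈ cs ∨ st.1 = "orange" then "Portocaliu"
      else if "yellow" ∈ cs ∨ st.1 = "yellow" then "Galben"
      else "Verde" := by
  induction cs with
  | nil =>
    rintro st (rfl | rfl | rfl | rfl | rfl) <;> decide
  | cons c cs ih =>
    rintro st (rfl | rfl | rfl | rfl | rfl) <;>
    · by_cases h4 : c = "red" <;> by_cases h3 : c = "orange" <;>
        by_cases h2 : c = "yellow" <;> by_cases h1 : c = "green" <;>
        first
        | (exfalso; simp_all; done)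
        | (subst_vars
           simp only [List.foldl, pvStepC, pvPrio]
           norm_num
           rw [ih _ (by unfold pvInv; simp)]
           simp
           done)
        | (simp only [List.foldl, pvStepC, pvPrio, if_neg h4, if_neg h3, if_neg h2, if_neg h1]
           norm_num
           rw [ih _ (by unfold pvInv; simp)]
           simp [Ne.symm h4, Ne.symm h3, Ne.symm h2])

-- ===== VERDICT (by name: the statement is the Claim_ definition above) =====
theorem parse_alert_color_py_spec : Claim_equal_parse_alert_color_py := by
  intro data _
  unfold Spec_parse_alert_color_py parse_alert_color_py parse_alert_color_py_alt
  by_cases h : pvGetAlerts data = []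
  · simp [h, pvProbe]
  · simp only [if_neg h, foldl_pvStep_eq]
    rw [fold_name _ ("green", 0) (Or.inl rfl)]
    simp only [pvProbe]
    by_cases hr : "red" ∈ (pvGetAlerts data).map (fun a => PySem.Str.lower (pvGetStr a "color" "green")) <;>
      by_cases ho : "orange" ∈ (pvGetAlerts data).map (fun a => PySem.Str.lower (pvGetStr a "color" "green")) <;>
      by_cases hy : "yellow" ∈ (pvGetAlerts data).map (fun a => PySem.Str.lower (pvGetStr a "color" "green")) <;>
      simp [PySem.Set.mem_ofList, hr, ho, hy]
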